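-- pv_equiv track=rewrite | github.com/likai-xixi/sili-jian-orchestrator | scripts/git_autocommit.py | path_selected
-- ===== SOURCE A (Python) =====
-- def path_selected(path: str, selectors: set[str]) -> bool:
--     normalized = path.replace("\\", "/").strip("/")
--     if normalized.startswith("ai/"):
--         return True
--     for selector in selectors:
--         base = selector.strip("/")
--         if not base:
--             continue
--         if normalized == base or normalized.startswith(base + "/"):
--             return True
--     return False
-- ===== SOURCE B (Python) =====
-- def path_selected(path: str, selectors: set[str]) -> bool:
--     bases = {s.strip("/") for s in selectors if s.strip("/")}
--     normalized = path.replace("\\", "/").strip("/")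
--     if normalized.startswith("ai/"):
--         return True
--     for i, ch in enumerate(normalized):
--         if ch == "/" and normalized[:i] in bases:
--             return True
--     return normalized in bases
-- ===== Notes on version B (the rewrite author's own statement) =====
-- stated objective: alternative
-- what changed: B builds a set of stripped nonempty selector bases once and probes it at each '/'-boundary prefix of the normalized path, instead of A's loop over selectors doing an equality and a startswith test per selector.
import Mathlib
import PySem

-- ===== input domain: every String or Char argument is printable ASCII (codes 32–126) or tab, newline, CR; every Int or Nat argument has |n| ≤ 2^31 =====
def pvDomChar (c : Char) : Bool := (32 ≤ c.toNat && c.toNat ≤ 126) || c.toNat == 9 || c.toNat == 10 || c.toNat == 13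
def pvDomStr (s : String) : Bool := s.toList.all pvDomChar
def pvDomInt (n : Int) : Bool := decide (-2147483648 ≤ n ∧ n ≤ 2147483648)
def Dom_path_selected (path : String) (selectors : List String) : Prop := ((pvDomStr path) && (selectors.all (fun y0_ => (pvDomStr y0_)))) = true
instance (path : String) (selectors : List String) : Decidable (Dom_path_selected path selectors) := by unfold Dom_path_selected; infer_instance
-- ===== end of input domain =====

-- B replaces A's per-selector prefix tests by a set of stripped selector bases probed at the
-- path's own segment boundaries (objective: alternative decomposition, same asymptotic cost).

-- ===== PORT A =====
def path_selected (path : String) (selectors : List String) : Bool :=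
  let normalized := PySem.Str.stripChars (PySem.Str.replace path "\\" "/") "/"
  if PySem.Str.startswith normalized "ai/" then true
  else
    -- 'for selector in selectors: … return True' over a set = any (the result is order-independent)
    selectors.any (fun selector =>
      let base := PySem.Str.stripChars selector "/"
      if base == "" then false
      else normalized == base || PySem.Str.startswith normalized (base ++ "/"))

-- ===== PORT B =====
def path_selected_alt (path : String) (selectors : List String) : Bool :=
  let bases : PySem.Set String :=
    PySem.Set.ofList ((selectors.filter
      (fun s => !(PySem.Str.stripChars s "/" == ""))).map
      (fun s => PySem.Str.stripChars s "/"))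
  let normalized := PySem.Str.stripChars (PySem.Str.replace path "\\" "/") "/"
  if PySem.Str.startswith normalized "ai/" then true
  else if (PySem.List.enumerate normalized.toList 0).any (fun p =>
        p.2 == '/' && PySem.Set.contains bases (PySem.Str.slice normalized none (some p.1)))
  then true
  else PySem.Set.contains bases normalized

-- ===== PRECONDITION & SPEC =====
def Spec_path_selected (path : String) (selectors : List String) (out : Bool) : Prop := out = path_selected_alt path selectors
instance (path : String) (selectors : List String) (out : Bool) : Decidable (Spec_path_selected path selectors out) := by unfold Spec_path_selected; infer_instance

-- ===== CLAIM (what is proved, stated in full; the proofs are below) =====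
def Claim_equal_path_selected : Prop := ∀ (path : String) (selectors : List String), Dom_path_selected path selectors → Spec_path_selected path selectors (path_selected path selectors)

-- ===== LEMMAS AND PROOFS =====

-- A prefix b followed by '/' occurs at the front of n exactly when some '/' position k of n
-- has n.take k = b: boundary prefixes and 'startswith (b ++ "/")' coincide.
theorem prefix_slash_iff (b n : List Char) :
    (b ++ ['/']) <+: n ↔ ∃ k : Nat, k < n.length ∧ n[k]? = some '/' ∧ n.take k = b := by
  constructor
  · rintro ⟨r, hr⟩
    refine ⟨b.length, ?_, ?_, ?_⟩
    · subst hr; simp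
    · subst hr; simp
    · subst hr; simp
  · rintro ⟨k, hk, hget, htake⟩
    refine ⟨n.drop (k+1), ?_⟩
    have h2 : n.drop k = n[k] :: n.drop (k+1) := List.drop_eq_getElem_cons hk
    have h3 : n[k] = '/' := by
      rw [List.getElem?_eq_getElem hk] at hget; exact Option.some.inj hget
    have h1 : n = n.take k ++ n.drop k := (List.take_append_drop k n).symm
    rw [h2, h3, htake] at h1
    simpa using h1.symm

-- the selector loop of A equals B's boundary-prefix probe of the bases set
theorem path_selected_core (n : String) (selectors : List String) :
    (selectors.any (fun selector =>
      let base := PySem.Str.stripChars selector "/"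
      if base == "" then false
      else n == base || PySem.Str.startswith n (base ++ "/")))
    =
    (let bases : PySem.Set String :=
      PySem.Set.ofList ((selectors.filter
        (fun s => !(PySem.Str.stripChars s "/" == ""))).map
        (fun s => PySem.Str.stripChars s "/"))
     ((PySem.List.enumerate n.toList 0).any (fun p =>
        p.2 == '/' && PySem.Set.contains bases (PySem.Str.slice n none (some p.1)))
      || PySem.Set.contains bases n)) := by
  rw [Bool.eq_iff_iff]
  simp only [List.any_eq_true, Bool.or_eq_true, Bool.and_eq_true,
    PySem.Set.contains_eq_listContains, List.contains_iff_mem,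
    PySem.Set.mem_ofList, List.mem_map, List.mem_filter,
    PySem.List.mem_enumerate_iff]
  constructor
  · rintro ⟨sel, hsel, hcond⟩
    by_cases hb : PySem.Str.stripChars sel "/" == ""
    · rw [if_pos hb] at hcond; exact absurd hcond (by simp)
    · rw [if_neg hb] at hcond
      rcases Bool.or_eq_true_iff.mp hcond with heq | hsw
      · replace heq := beq_iff_eq.mp heq
        exact Or.inr ⟨sel, ⟨hsel, by simp [hb]⟩, heq.symm⟩
      · left
        have hsw' : PySem.Chars.startswith n.toList ((PySem.Str.stripChars sel "/").toList ++ ['/']) = true := by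
          simpa using hsw
        have hpre' := (PySem.Chars.startswith_iff _ _).mp hsw'
        obtain ⟨k, hk, hget, htake⟩ := (prefix_slash_iff _ _).mp hpre'
        have hgetv : n.toList[k] = '/' := by
          rw [List.getElem?_eq_getElem hk] at hget; exact Option.some.inj hget
        refine ⟨((0:Int) + (k:Int), n.toList[k]), ⟨k, hk, rfl⟩, by simp [hgetv], ?_⟩
        refine ⟨sel, ⟨hsel, by simp [hb]⟩, ?_⟩
        have hslice : PySem.Str.slice n none (some ((0:Int) + (k : Int))) = String.ofList (n.toList.take k) := by
          apply String.toList_injective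
          rw [zero_add]
          simp [PySem.List.slice_to_natCast, String.toList_ofList]
        rw [hslice, htake]
        exact String.ofList_toList.symm
  · rintro (⟨⟨i, c⟩, ⟨k, hk, hik⟩, hc, sel, ⟨hsel, hb⟩, hbase⟩ | ⟨sel, ⟨hsel, hb⟩, hbase⟩)
    · refine ⟨sel, hsel, ?_⟩
      have hb' : ¬(PySem.Str.stripChars sel "/" == "") = true := by simpa using hb
      rw [if_neg hb']
      apply Bool.or_eq_true_iff.mpr
      right
      obtain ⟨hi, hcv⟩ := Prod.mk.injEq .. ▸ hik
      have hgetv : n.toList[k] = '/' := by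
        have := beq_iff_eq.mp hc; rw [hcv] at this; exact this
      have htake : n.toList.take k = (PySem.Str.stripChars sel "/").toList := by
        have := congrArg String.toList hbase
        rw [hi, zero_add] at this
        simpa [PySem.List.slice_to_natCast] using this.symm
      have hpre : ((PySem.Str.stripChars sel "/").toList ++ ['/']) <+: n.toList :=
        (prefix_slash_iff _ _).mpr ⟨k, hk, by rw [List.getElem?_eq_getElem hk, hgetv], htake⟩
      have := (PySem.Chars.startswith_iff n.toList _).mpr hpre
      simpa using this
    · refine ⟨sel, hsel, ?_⟩
      have hb' : ¬(PySem.Str.stripChars sel "/" == "") = true := by simpa using hb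
      rw [if_neg hb']
      apply Bool.or_eq_true_iff.mpr
      exact Or.inl (beq_iff_eq.mpr hbase.symm)

-- ===== VERDICT (by name: the statement is the Claim_ definition above) =====
theorem path_selected_spec : Claim_equal_path_selected := by
  intro path selectors _
  unfold Spec_path_selected path_selected path_selected_alt
  by_cases hai : PySem.Str.startswith (PySem.Str.stripChars (PySem.Str.replace path "\\" "/") "/") "ai/" = true
  · rw [if_pos hai, if_pos hai]
  · rw [if_neg hai, if_neg hai, path_selected_core]
    dsimp only
    rw [Bool.if_true_left]
    simp
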